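-- pv_equiv track=rewrite | github.com/Joanna0123/character_profiling | code/epub2json.py | divide_str
-- ===== SOURCE A (Python) =====
-- def divide_str(s, sep=['\n', '.', '!','?']):
--     mid_len = len(s) // 2
--     best_sep_pos = len(s) + 1
--     best_sep = None
--     for curr_sep in sep:
--         sep_pos = s.rfind(curr_sep, 0, mid_len)
--         if sep_pos > 0 and abs(sep_pos - mid_len) < abs(best_sep_pos -
--                                                         mid_len):
--             best_sep_pos = sep_pos
--             best_sep = curr_sep
--     if not best_sep:
--         return s, ''
--     return s[:best_sep_pos + 1], s[best_sep_pos + 1:]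
-- ===== SOURCE B (Python) =====
-- def divide_str(s, sep=['\n', '.', '!', '?']):
--     mid_len = len(s) // 2
--     for i in range(mid_len - 1, 0, -1):
--         for c in sep:
--             if i + len(c) <= mid_len and s.startswith(c, i):
--                 return s[:i + 1], s[i + 1:]
--     return s, ''
-- ===== Notes on version B (the rewrite author's own statement) =====
-- stated objective: faster
-- what changed: Replaces A's per-separator rfind scans of the whole first half (with best-position bookkeeping) by a single backward scan over positions from mid_len-1 down to 1 that returns at the first, i.e. rightmost, position where any separator matches inside the first half.
-- outside the precondition, e.g. on divide_str('a.bcde', ['', '.']): A returns ('a.bcde', ''), B returns ('a.b', 'cde')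
import Mathlib
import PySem

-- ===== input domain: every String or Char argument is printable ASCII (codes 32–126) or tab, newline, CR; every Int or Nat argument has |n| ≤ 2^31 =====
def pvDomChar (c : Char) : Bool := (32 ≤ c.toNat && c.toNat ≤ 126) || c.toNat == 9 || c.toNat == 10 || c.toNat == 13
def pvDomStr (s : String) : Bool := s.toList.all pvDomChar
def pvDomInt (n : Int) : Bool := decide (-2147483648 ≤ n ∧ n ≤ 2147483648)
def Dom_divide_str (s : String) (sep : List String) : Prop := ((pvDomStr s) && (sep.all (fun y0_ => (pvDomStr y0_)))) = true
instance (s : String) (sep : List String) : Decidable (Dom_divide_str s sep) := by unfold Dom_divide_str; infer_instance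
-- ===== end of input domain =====

-- B replaces A's per-separator rfind scans of the whole first half by one backward scan over positions
-- that stops at the rightmost match; equivalence is proved except where an empty-string separator
-- meets a string long enough to split (excluded by Pre_).

-- ===== PORT A =====
-- the for-loop over sep, state = (best_sep_pos, best_sep)
def divideStrLoopA (s : String) (midLen : Int) : List String → Int × Option String → Int × Option String
  | [], st => st
  | c :: rest, st =>
      let pos := PySem.Str.rfindFrom s c 0 (some midLen)
      divideStrLoopA s midLen rest
        (if 0 < pos ∧ |pos - midLen| < |st.1 - midLen| then (pos, some c) else st)

def divide_str (s : String) (sep : List String) : String × String :=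
  let midLen : Int := PySem.Int.floordiv (PySem.Str.len s) 2
  let st := divideStrLoopA s midLen sep (PySem.Str.len s + 1, none)
  match st.2 with
  | none => (s, "")          -- the falsiness test on best_sep fires on None …
  | some c =>
      if c = "" then (s, "") -- … and on an empty best_sep, which is falsy too
      else (PySem.Str.slice s none (some (st.1 + 1)), PySem.Str.slice s (some (st.1 + 1)) none)

-- ===== PORT B =====
-- the backward for-loop over positions i = mid_len-1 … 1
def divideStrLoopB (l : List Char) (seps : List (List Char)) (mid : Nat) : Nat → Option Nat
  | 0 => none
  | i + 1 =>
      if seps.any (fun c => decide ((i + 1) + c.length ≤ mid) && PySem.Chars.startswith (l.drop (i + 1)) c)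
      then some (i + 1)
      else divideStrLoopB l seps mid i

def divide_str_alt (s : String) (sep : List String) : String × String :=
  let l := s.toList
  let mid := l.length / 2
  match divideStrLoopB l (sep.map String.toList) mid (mid - 1) with
  | some i => (String.ofList (l.take (i + 1)), String.ofList (l.drop (i + 1)))  -- s[:i+1], s[i+1:] with 0 ≤ i+1 ≤ len: exact
  | none => (s, "")

-- ===== PRECONDITION & SPEC =====
-- Pre_ excludes the degenerate empty-string separator, but only together with a string of length ≥ 4 (the
-- only combination where behaviours diverge): there neither value is specified — A's falsiness test on
-- best_sep accidentally suppresses every split, while B treats an empty separator as matching everywhere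
-- and splits near the middle.
def Pre_divide_str (s : String) (sep : List String) : Prop := ¬ ("" ∈ sep ∧ 4 ≤ s.toList.length)
instance (s : String) (sep : List String) : Decidable (Pre_divide_str s sep) := by unfold Pre_divide_str; infer_instance
def pvWitness_divide_str : String × List String := ("a.bc", [".", "\n"])

def Spec_divide_str (s : String) (sep : List String) (out : String × String) : Prop := out = divide_str_alt s sep
instance (s : String) (sep : List String) (out : String × String) : Decidable (Spec_divide_str s sep out) := by unfold Spec_divide_str; infer_instance

-- ===== CLAIM (what is proved, stated in full; the proofs are below) =====
def Claim_equal_divide_str : Prop := ∀ (s : String) (sep : List String), Dom_divide_str s sep → Pre_divide_str s sep → Spec_divide_str s sep (divide_str s sep)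

-- ===== LEMMAS AND PROOFS =====

-- 'j is a usable split position': some separator matches at j, entirely inside s[:mid]
def pvGood (s : String) (sep : List String) (mid j : Nat) : Prop :=
  1 ≤ j ∧ ∃ c ∈ sep, j + c.toList.length ≤ mid ∧ c.toList.isPrefixOf (s.toList.drop j) = true

theorem pvGood_nil (s : String) (mid j : Nat) : ¬ pvGood s [] mid j := by
  simp [pvGood]

theorem pvGood_append_singleton (s : String) (ps : List String) (c : String) (mid j : Nat) :
    pvGood s (ps ++ [c]) mid j ↔
      pvGood s ps mid j ∨ (1 ≤ j ∧ j + c.toList.length ≤ mid ∧ c.toList.isPrefixOf (s.toList.drop j) = true) := by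
  simp only [pvGood, List.mem_append, List.mem_singleton]
  constructor
  · rintro ⟨h1, c1, (hm | rfl), hb, hp⟩
    · exact Or.inl ⟨h1, c1, hm, hb, hp⟩
    · exact Or.inr ⟨h1, hb, hp⟩
  · rintro (⟨h1, c1, hm, hb, hp⟩ | ⟨h1, hb, hp⟩)
    · exact ⟨h1, c1, Or.inl hm, hb, hp⟩
    · exact ⟨h1, c, Or.inr rfl, hb, hp⟩

theorem go_spec (t c : List Char) (k : Nat) :
    (PySem.Chars.rfind.go t c k = -1 ∧ ∀ j ≤ k, ¬ c.isPrefixOf (t.drop j) = true) ∨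
    (∃ j : Nat, j ≤ k ∧ PySem.Chars.rfind.go t c k = (j : Int) ∧ c.isPrefixOf (t.drop j) = true ∧
        ∀ i, j < i → i ≤ k → ¬ c.isPrefixOf (t.drop i) = true) := by
  induction k with
  | zero =>
      by_cases h : c.isPrefixOf t = true
      · right; exact ⟨0, le_refl _, by simp [PySem.Chars.rfind.go, h], by simpa using h, by omega⟩
      · left
        constructor
        · simp [PySem.Chars.rfind.go, h]
        · intro j hj; interval_cases j; simpa using h
  | succ k ih =>
      have hstep : PySem.Chars.rfind.go t c (k + 1) =
          if c.isPrefixOf (t.drop (k + 1)) then ((k + 1 : Nat) : Int) else PySem.Chars.rfind.go t c k := rfl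
      by_cases h : c.isPrefixOf (t.drop (k + 1)) = true
      · right
        exact ⟨k + 1, le_refl _, by rw [hstep]; simp [h], h, by omega⟩
      · rw [hstep]; simp only [h]
        rcases ih with ⟨h1, h2⟩ | ⟨j, hj, he, hp, hmax⟩
        · left
          refine ⟨h1, fun j hj => ?_⟩
          rcases Nat.lt_or_ge j (k + 1) with hlt | hge
          · exact h2 j (by omega)
          · have : j = k + 1 := by omega
            subst this; simpa using h
        · right
          refine ⟨j, by omega, he, hp, fun i hi1 hi2 => ?_⟩
          rcases Nat.lt_or_ge i (k + 1) with hlt | hge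
          · exact hmax i hi1 (by omega)
          · have : i = k + 1 := by omega
            subst this; simpa using h

theorem pfx_take_iff (l c : List Char) (mid j : Nat) (hj : j ≤ mid) :
    c.isPrefixOf ((l.take mid).drop j) = true ↔ (j + c.length ≤ mid ∧ c.isPrefixOf (l.drop j) = true) := by
  rw [List.drop_take]
  simp only [List.isPrefixOf_iff_prefix, List.prefix_take_iff]
  constructor
  · rintro ⟨hp, hl⟩; exact ⟨by omega, hp⟩
  · rintro ⟨hl, hp⟩; exact ⟨hp, by omega⟩

-- characterisation of s.rfind(c, 0, mid) for a nonempty separator c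
theorem rfind_spec (l c : List Char) (mid : Nat) (hml : mid ≤ l.length) (hc : c ≠ []) :
    (PySem.Chars.rfindFrom l c 0 (some (mid : Int)) ≤ 0 ∧
      ∀ j, 1 ≤ j → ¬ (j + c.length ≤ mid ∧ c.isPrefixOf (l.drop j) = true)) ∨
    (∃ j : Nat, 1 ≤ j ∧ PySem.Chars.rfindFrom l c 0 (some (mid : Int)) = (j : Int) ∧
      (j + c.length ≤ mid ∧ c.isPrefixOf (l.drop j) = true) ∧
      ∀ i, j < i → ¬ (i + c.length ≤ mid ∧ c.isPrefixOf (l.drop i) = true)) := by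
  have hlen : (l.take mid).length = mid := by simp [hml]
  have hrw : PySem.Chars.rfindFrom l c 0 (some (mid : Int)) =
      (if PySem.Chars.rfind.go (l.take mid) c mid = -1 then (-1 : Int)
       else PySem.Chars.rfind.go (l.take mid) c mid) := by
    simp only [PySem.Chars.rfindFrom, PySem.Chars.rfind]
    have h1 : ¬ ((l.length : Int) < (mid : Int)) := by exact_mod_cast not_lt.mpr hml
    have h2 : ¬ ((mid : Int) < 0) := by omega
    simp only [h1, if_false, h2, if_neg (by omega : ¬ (0 : Int) < 0)]
    simp only [Int.toNat_zero, List.drop_zero, Int.toNat_natCast, hlen]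
    split <;> omega
  -- j beyond mid can never satisfy the bound
  have hbig : ∀ i, mid < i → ¬ (i + c.length ≤ mid ∧ c.isPrefixOf (l.drop i) = true) := by
    intro i hi ⟨hb, _⟩
    have := List.length_pos_iff.mpr hc
    omega
  rcases go_spec (l.take mid) c mid with ⟨he, hnone⟩ | ⟨j, hj, he, hp, hmax⟩
  · left
    refine ⟨by rw [hrw, he]; simp, fun j hj1 ⟨hb, hp⟩ => ?_⟩
    have hjm : j ≤ mid := by
      have := List.length_pos_iff.mpr hc; omega
    exact hnone j hjm ((pfx_take_iff l c mid j hjm).mpr ⟨hb, hp⟩)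
  · have hgo : PySem.Chars.rfindFrom l c 0 (some (mid : Int)) = (j : Int) := by
      rw [hrw, he]
      rw [if_neg (by omega : ¬ ((j : Int) = -1))]
    have hpj := (pfx_take_iff l c mid j hj).mp hp
    rcases Nat.eq_zero_or_pos j with hj0 | hj1
    · left
      subst hj0
      refine ⟨by rw [hgo]; simp, fun i hi1 ⟨hb, hpi⟩ => ?_⟩
      have him : i ≤ mid := by
        have := List.length_pos_iff.mpr hc; omega
      exact hmax i (by omega) him ((pfx_take_iff l c mid i him).mpr ⟨hb, hpi⟩)
    · right
      refine ⟨j, hj1, hgo, hpj, fun i hi ⟨hb, hpi⟩ => ?_⟩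
      rcases Nat.lt_or_ge mid i with hbig' | him
      · exact hbig i hbig' ⟨hb, hpi⟩
      · exact hmax i hi him ((pfx_take_iff l c mid i him).mpr ⟨hb, hpi⟩)

-- A-side loop invariant
def pvAInv (s : String) (mid : Nat) (ps : List String) (st : Int × Option String) : Prop :=
  (st = ((s.toList.length : Int) + 1, none) ∧ ∀ j, ¬ pvGood s ps mid j) ∨
  (∃ m : Nat, ∃ c0, st = ((m : Int), some c0) ∧ c0 ∈ ps ∧ 1 ≤ m ∧ m < mid ∧
      pvGood s ps mid m ∧ ∀ j, m < j → ¬ pvGood s ps mid j)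

theorem aLoop_invariant (s : String) (mid : Nat) (hm2 : 2 * mid ≤ s.toList.length)
    (cs : List String) (hne : ∀ c ∈ cs, c ≠ "") :
    ∀ (processed : List String) (st : Int × Option String), pvAInv s mid processed st →
      pvAInv s mid (processed ++ cs) (divideStrLoopA s ((mid : Int)) cs st) := by
  induction cs with
  | nil => intro ps st h; simpa using h
  | cons c rest ih =>
      intro ps st hInv
      have hc : c ≠ "" := hne c (by simp)
      have hcl : c.toList ≠ [] := by
        intro h; apply hc
        have := congrArg String.ofList h
        simpa using this
      have hcl1 : 1 ≤ c.toList.length := List.length_pos_iff.mpr hcl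
      have hrest : ∀ x ∈ rest, x ≠ "" := fun x hx => hne x (by simp [hx])
      have hml : mid ≤ s.toList.length := by omega
      have hstep : divideStrLoopA s ((mid : Int)) (c :: rest) st =
          divideStrLoopA s ((mid : Int)) rest
            (if 0 < PySem.Str.rfindFrom s c 0 (some (mid : Int)) ∧
                |PySem.Str.rfindFrom s c 0 (some (mid : Int)) - (mid : Int)| < |st.1 - (mid : Int)|
             then (PySem.Str.rfindFrom s c 0 (some (mid : Int)), some c) else st) := rfl
  -- characterise this separator's rfind
      have hr := rfind_spec s.toList c.toList mid hml hcl
      have hps : ps ++ c :: rest = (ps ++ [c]) ++ rest := by simp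
      rw [hstep, hps]
      apply ih hrest (ps ++ [c])
      -- establish the invariant after one step
      simp only [PySem.Str.rfindFrom] at *
      rcases hInv with ⟨hst, hnone⟩ | ⟨m, c0, hst, hc0, hm1, hmlt, hg, hmax⟩
      · rcases hr with ⟨hle, hno⟩ | ⟨j, hj1, he, hgj, hjmax⟩
        · rw [if_neg (by rw [hst]; simp only; omega)]
          left
          refine ⟨hst, fun j hj => ?_⟩
          rcases (pvGood_append_singleton s ps c mid j).mp hj with h | ⟨h1, h2, h3⟩
          · exact hnone j h
          · exact hno j h1 ⟨h2, h3⟩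
        · have hjlt : j < mid := by omega
          rw [if_pos (by
            rw [hst, he]; simp only
            constructor
            · exact_mod_cast hj1
            · rw [abs_of_nonpos (by omega), abs_of_nonneg (by omega)]
              omega)]
          right
          rw [he]
          refine ⟨j, c, rfl, by simp, hj1, hjlt,
            (pvGood_append_singleton s ps c mid j).mpr (Or.inr ⟨hj1, hgj.1, hgj.2⟩),
            fun i hi hgi => ?_⟩
          rcases (pvGood_append_singleton s ps c mid i).mp hgi with h | ⟨h1, h2, h3⟩
          · exact hnone i h
          · exact hjmax i hi ⟨h2, h3⟩
      · rcases hr with ⟨hle, hno⟩ | ⟨j, hj1, he, hgj, hjmax⟩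
        · rw [if_neg (by rw [hst]; simp only; omega)]
          right
          refine ⟨m, c0, hst, by simp [hc0], hm1, hmlt,
            (pvGood_append_singleton s ps c mid m).mpr (Or.inl hg), fun i hi hgi => ?_⟩
          rcases (pvGood_append_singleton s ps c mid i).mp hgi with h | ⟨h1, h2, h3⟩
          · exact hmax i hi h
          · exact hno i h1 ⟨h2, h3⟩
        · have hjlt : j < mid := by omega
          by_cases hcmp : m < j
          · rw [if_pos (by
              rw [hst, he]; simp only
              constructor
              · exact_mod_cast hj1
              · rw [abs_of_nonpos (by omega), abs_of_nonpos (by omega)]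
                omega)]
            right
            rw [he]
            refine ⟨j, c, rfl, by simp, hj1, hjlt,
              (pvGood_append_singleton s ps c mid j).mpr (Or.inr ⟨hj1, hgj.1, hgj.2⟩),
              fun i hi hgi => ?_⟩
            rcases (pvGood_append_singleton s ps c mid i).mp hgi with h | ⟨h1, h2, h3⟩
            · exact hmax i (by omega) h
            · exact hjmax i hi ⟨h2, h3⟩
          · rw [if_neg (by
              rw [hst, he]; simp only
              rw [abs_of_nonpos (by omega), abs_of_nonpos (by omega)]
              omega)]
            right
            refine ⟨m, c0, hst, by simp [hc0], hm1, hmlt,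
              (pvGood_append_singleton s ps c mid m).mpr (Or.inl hg), fun i hi hgi => ?_⟩
            rcases (pvGood_append_singleton s ps c mid i).mp hgi with h | ⟨h1, h2, h3⟩
            · exact hmax i hi h
            · exact hjmax i (by omega) ⟨h2, h3⟩

-- B-side loop characterisation
theorem bLoop_eq_some_iff (s : String) (sep : List String) (mid : Nat) (k : Nat) (i : Nat) :
    divideStrLoopB s.toList (sep.map String.toList) mid k = some i ↔
      (1 ≤ i ∧ i ≤ k ∧ pvGood s sep mid i ∧ ∀ j, i < j → j ≤ k → ¬ pvGood s sep mid j) := by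
  have hany : ∀ n : Nat, 1 ≤ n →
      (((sep.map String.toList).any
        (fun c => decide (n + c.length ≤ mid) && PySem.Chars.startswith (s.toList.drop n) c)) = true
        ↔ pvGood s sep mid n) := by
    intro n hn
    simp [List.any_eq_true, pvGood, PySem.Chars.startswith, hn]
  induction k with
  | zero =>
      simp only [divideStrLoopB]
      constructor
      · intro h; cases h
      · rintro ⟨h1, h2, _⟩; omega
  | succ k ih =>
      simp only [divideStrLoopB]
      by_cases h : ((sep.map String.toList).any
          (fun c => decide ((k + 1) + c.length ≤ mid) && PySem.Chars.startswith (s.toList.drop (k + 1)) c)) = true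
      · rw [if_pos h]
        have hg : pvGood s sep mid (k + 1) := (hany (k + 1) (by omega)).mp h
        constructor
        · intro he
          have : i = k + 1 := by cases he; rfl
          subst this
          exact ⟨by omega, le_refl _, hg, by omega⟩
        · rintro ⟨h1, h2, h3, h4⟩
          rcases Nat.lt_or_ge i (k + 1) with hlt | hge
          · exact absurd hg (h4 (k + 1) (by omega) (le_refl _))
          · have : i = k + 1 := by omega
            subst this; rfl
      · rw [if_neg h]
        have hng : ¬ pvGood s sep mid (k + 1) := fun hg => h ((hany (k + 1) (by omega)).mpr hg)
        refine ih.trans ?_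
        constructor
        · rintro ⟨h1, h2, h3, h4⟩
          refine ⟨h1, by omega, h3, fun j hj1 hj2 => ?_⟩
          rcases Nat.lt_or_ge j (k + 1) with hlt | hge
          · exact h4 j hj1 (by omega)
          · have : j = k + 1 := by omega
            subst this; exact hng
        · rintro ⟨h1, h2, h3, h4⟩
          have hik : i ≤ k := by
            rcases Nat.lt_or_ge i (k + 1) with hlt | hge
            · omega
            · have : i = k + 1 := by omega
              subst this; exact absurd h3 hng
          exact ⟨h1, hik, h3, fun j hj1 hj2 => h4 j hj1 (by omega)⟩

theorem bLoop_eq_none_iff (s : String) (sep : List String) (mid : Nat) (k : Nat) :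
    divideStrLoopB s.toList (sep.map String.toList) mid k = none ↔
      ∀ j, 1 ≤ j → j ≤ k → ¬ pvGood s sep mid j := by
  induction k with
  | zero =>
      simp only [divideStrLoopB]
      constructor
      · intro _ j h1 h2; omega
      · intro _; trivial
  | succ k ih =>
      simp only [divideStrLoopB]
      by_cases h : ((sep.map String.toList).any
          (fun c => decide ((k + 1) + c.length ≤ mid) && PySem.Chars.startswith (s.toList.drop (k + 1)) c)) = true
      · rw [if_pos h]
        have hg : pvGood s sep mid (k + 1) := by
          simpa [List.any_eq_true, pvGood, PySem.Chars.startswith, (by omega : 1 ≤ k + 1)] using h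
        constructor
        · intro he; cases he
        · intro hall; exact absurd hg (hall (k + 1) (by omega) (le_refl _))
      · rw [if_neg h]
        have hng : ¬ pvGood s sep mid (k + 1) := by
          intro hg
          apply h
          simpa [List.any_eq_true, pvGood, PySem.Chars.startswith, (by omega : 1 ≤ k + 1)] using hg
        rw [ih]
        constructor
        · intro hall j hj1 hj2
          rcases Nat.lt_or_ge j (k + 1) with hlt | hge
          · exact hall j hj1 (by omega)
          · have : j = k + 1 := by omega
            subst this; exact hng
        · intro hall j hj1 hj2; exact hall j hj1 (by omega)

theorem slice_take (s : String) (m : Nat) :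
    PySem.Str.slice s none (some ((m : Int) + 1)) = String.ofList (s.toList.take (m + 1)) := by
  simp only [PySem.Str.slice, PySem.Chars.slice]
  rw [show ((m : Int) + 1) = ((m + 1 : Nat) : Int) by push_cast; ring, PySem.List.slice_to_natCast]

theorem slice_drop (s : String) (m : Nat) :
    PySem.Str.slice s (some ((m : Int) + 1)) none = String.ofList (s.toList.drop (m + 1)) := by
  simp only [PySem.Str.slice, PySem.Chars.slice]
  rw [show ((m : Int) + 1) = ((m + 1 : Nat) : Int) by push_cast; ring, PySem.List.slice_from_natCast]

-- with mid ≤ 1 no nonempty separator can ever win, so best_sep stays None or becomes the falsy ''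
theorem aLoop_small (s : String) (mid : Nat) (hml : mid ≤ s.toList.length) (hmid : mid ≤ 1) :
    ∀ (cs : List String) (st : Int × Option String), (st.2 = none ∨ st.2 = some "") →
      ((divideStrLoopA s ((mid : Int)) cs st).2 = none ∨
        (divideStrLoopA s ((mid : Int)) cs st).2 = some "") := by
  intro cs
  induction cs with
  | nil => intro st h; simpa using h
  | cons c rest ih =>
      intro st h
      have hstep : divideStrLoopA s ((mid : Int)) (c :: rest) st =
          divideStrLoopA s ((mid : Int)) rest
            (if 0 < PySem.Str.rfindFrom s c 0 (some (mid : Int)) ∧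
                |PySem.Str.rfindFrom s c 0 (some (mid : Int)) - (mid : Int)| < |st.1 - (mid : Int)|
             then (PySem.Str.rfindFrom s c 0 (some (mid : Int)), some c) else st) := rfl
      rw [hstep]
      apply ih
      by_cases hc : c = ""
      · subst hc; split <;> simp [h]
      · have hcl : c.toList ≠ [] := by
          intro hnil; apply hc
          have := congrArg String.ofList hnil
          simpa using this
        have hcl1 : 1 ≤ c.toList.length := List.length_pos_iff.mpr hcl
        have hpos : ¬ 0 < PySem.Str.rfindFrom s c 0 (some (mid : Int)) := by
          simp only [PySem.Str.rfindFrom]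
          rcases rfind_spec s.toList c.toList mid hml hcl with ⟨hle, _⟩ | ⟨j, hj1, he, ⟨hb, _⟩, _⟩
          · omega
          · omega
        rw [if_neg (by intro ⟨h1, _⟩; exact hpos h1)]
        exact h

-- ===== VERDICT (by name: the statement is the Claim_ definition above) =====
theorem divide_str_spec : Claim_equal_divide_str := by
  intro s sep _ hpre
  unfold Spec_divide_str
  set mid := s.toList.length / 2 with hmid
  have hm2 : 2 * mid ≤ s.toList.length := by omega
  have hmidI : PySem.Int.floordiv (PySem.Str.len s) 2 = (mid : Int) := by
    rw [PySem.Str.len_eq]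
    exact_mod_cast PySem.Int.floordiv_natCast s.toList.length 2
  have hA : divide_str s sep =
      (match (divideStrLoopA s ((mid : Int)) sep ((s.toList.length : Int) + 1, none)).2 with
       | none => (s, "")
       | some c =>
           if c = "" then (s, "")
           else (PySem.Str.slice s none (some ((divideStrLoopA s ((mid : Int)) sep ((s.toList.length : Int) + 1, none)).1 + 1)),
                 PySem.Str.slice s (some ((divideStrLoopA s ((mid : Int)) sep ((s.toList.length : Int) + 1, none)).1 + 1)) none)) := by
    unfold divide_str
    rw [hmidI, PySem.Str.len_eq]
  have hB : divide_str_alt s sep =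
      (match divideStrLoopB s.toList (sep.map String.toList) mid (mid - 1) with
       | some i => (String.ofList (s.toList.take (i + 1)), String.ofList (s.toList.drop (i + 1)))
       | none => (s, "")) := rfl
  by_cases hE : "" ∈ sep
  · -- the empty separator is present, so (by Pre_) the string is short: both sides return (s, '')
    have hlen : s.toList.length < 4 := by
      by_contra hge
      exact hpre ⟨hE, by omega⟩
    have hmid1 : mid ≤ 1 := by omega
    have hA2 := aLoop_small s mid (by omega) hmid1 sep ((s.toList.length : Int) + 1, none) (Or.inl rfl)
    have hm0 : mid - 1 = 0 := by omega
    rw [hA, hB, hm0]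
    rcases hA2 with h2 | h2 <;> rw [h2] <;> simp [divideStrLoopB]
  · -- no empty separator: A's best position is the rightmost usable one, which B finds directly
    have hne : ∀ c ∈ sep, c ≠ "" := fun c hc he => hE (he ▸ hc)
    have hInv := aLoop_invariant s mid hm2 sep hne []
      ((s.toList.length : Int) + 1, none) (Or.inl ⟨rfl, fun j => pvGood_nil s mid j⟩)
    simp only [List.nil_append] at hInv
    rcases hInv with ⟨hst, hnone⟩ | ⟨m, c0, hst, hc0, hm1, hmlt, hg, hmax⟩
    · -- no usable split position: both return (s, '')
      have hbn : divideStrLoopB s.toList (sep.map String.toList) mid (mid - 1) = none :=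
        (bLoop_eq_none_iff s sep mid (mid - 1)).mpr (fun j h1 h2 => hnone j)
      rw [hA, hB, hst, hbn]
    · -- m is the best split position for both
      have hbs : divideStrLoopB s.toList (sep.map String.toList) mid (mid - 1) = some m :=
        (bLoop_eq_some_iff s sep mid (mid - 1) m).mpr
          ⟨hm1, by omega, hg, fun j hj1 _ => hmax j hj1⟩
      have hc0ne : c0 ≠ "" := hne c0 hc0
      rw [hA, hB, hst, hbs]
      simp only [hc0ne, if_false, slice_take s m, slice_drop s m]
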